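-- pv_equiv track=rewrite | github.com/algabg1/IA-202401-HC-SA-GA | auxiliar.py | converte_tabuleiro
-- ===== SOURCE A (Python) =====
-- def converte_tabuleiro(VT):
--
--     N = len(VT)
--
--     L = [0]*N
--     T = []
--     for i in range(N):
--         T += [L.copy()]
--
--     for lin in range(N):
--         for col in range(N):
--             if lin+1 == VT[col]:
--                 T[lin][col] = 1
--
--     return T
-- ===== SOURCE B (Python) =====
-- def converte_tabuleiro(VT):
--     N = len(VT)
--     T = [[0] * N for _ in range(N)]
--     for col, v in enumerate(VT):
--         if 1 <= v <= N:
--             T[v - 1][col] = 1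
--     return T
-- ===== Notes on version B (the rewrite author's own statement) =====
-- stated objective: faster
-- what changed: Replaces A's full N*N grid scan (testing lin+1 == VT[col] for every cell) with a single pass over the columns that places each in-range value v directly at row v-1, guarded by 1 <= v <= N to ignore out-of-range values exactly as A does.
import Mathlib
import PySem

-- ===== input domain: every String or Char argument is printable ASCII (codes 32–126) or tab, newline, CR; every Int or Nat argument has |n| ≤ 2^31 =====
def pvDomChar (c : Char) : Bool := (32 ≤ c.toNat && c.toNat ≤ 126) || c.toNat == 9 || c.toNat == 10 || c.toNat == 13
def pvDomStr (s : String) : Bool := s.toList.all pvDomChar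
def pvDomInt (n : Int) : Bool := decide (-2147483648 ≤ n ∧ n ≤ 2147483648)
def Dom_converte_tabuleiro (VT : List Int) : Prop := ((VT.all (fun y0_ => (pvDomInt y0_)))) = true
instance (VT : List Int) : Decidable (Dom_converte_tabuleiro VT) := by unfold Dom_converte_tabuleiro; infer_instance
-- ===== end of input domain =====

-- B replaces A's full N×N grid scan with a single pass over the columns that
-- places each in-range value v directly at row v-1 (objective: faster; the
-- timing run measured B ≥ 1.5× faster at the largest size).

-- shared helper: the Python statement `T[r][c] = 1`
def pvSet1 (T : List (List Int)) (r c : Nat) : List (List Int) :=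
  T.modify r (fun row => row.set c 1)

-- ===== PORT A =====
def converte_tabuleiro (VT : List Int) : List (List Int) :=
  let N := VT.length
  let L := List.replicate N (0 : Int)
  let T := (List.range N).foldl (fun T _ => T ++ [L]) []
  (List.range N).foldl (fun T (lin : Nat) =>
    (List.range N).foldl (fun T (col : Nat) =>
      if ((lin : Int) + 1 = VT.getD col 0) then pvSet1 T lin col else T) T) T

-- ===== PORT B =====
def converte_tabuleiro_alt (VT : List Int) : List (List Int) :=
  let N := VT.length
  let T := List.replicate N (List.replicate N (0 : Int))
  (PySem.List.enumerate VT).foldl (fun T p =>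
    if 1 ≤ p.2 ∧ p.2 ≤ (N : Int) then pvSet1 T (p.2 - 1).toNat p.1.toNat else T) T

-- ===== PRECONDITION & SPEC =====
def Spec_converte_tabuleiro (VT : List Int) (out : List (List Int)) : Prop := out = converte_tabuleiro_alt VT
instance (VT : List Int) (out : List (List Int)) : Decidable (Spec_converte_tabuleiro VT out) := by unfold Spec_converte_tabuleiro; infer_instance

-- ===== CLAIM (what is proved, stated in full; the proofs are below) =====
def Claim_equal_converte_tabuleiro : Prop := ∀ (VT : List Int), Dom_converte_tabuleiro VT → Spec_converte_tabuleiro VT (converte_tabuleiro VT)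

-- ===== LEMMAS AND PROOFS =====

-- entry (r,c) of a matrix, as an Option
def pvGet2 (T : List (List Int)) (r c : Nat) : Option Int :=
  T[r]?.bind (fun row => row[c]?)

theorem pvSet1_get2 (T : List (List Int)) (r c r' c' : Nat) :
    pvGet2 (pvSet1 T r c) r' c' =
      if r = r' ∧ c = c' then (pvGet2 T r c).map (fun _ => (1 : Int)) else pvGet2 T r' c' := by
  simp only [pvGet2, pvSet1, List.getElem?_modify]
  by_cases hr : r = r'
  · subst hr
    cases h : T[r]? with
    | none => simp
    | some row =>
      simp only [Option.bind_some]
      by_cases hc : c = c'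
      · subst hc
        cases hcw : row[c]? with
        | none =>
          have : ¬ c < row.length := by
            intro hlt; exact (List.getElem?_eq_none_iff.mp hcw).not_gt hlt
          simp [this]
        | some x =>
          have : c < row.length := by
            by_contra hn
            rw [List.getElem?_eq_none_iff.mpr (Nat.le_of_not_lt hn)] at hcw
            simp at hcw
          simp [this]
      · simp [hc]
  · cases h : T[r']? <;> simp [hr]

theorem pvSet1_shape (T : List (List Int)) (r c : Nat) :
    (pvSet1 T r c).map List.length = T.map List.length := by
  apply List.ext_getElem?
  intro i
  simp only [List.getElem?_map, pvSet1, List.getElem?_modify]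
  cases T[i]? with
  | none => simp
  | some row =>
    by_cases h : r = i <;> simp [h, List.length_set]

theorem pvFold_get2 {σ : Type} (g : σ → Prop) [DecidablePred g] (ρ γ : σ → Nat)
    (ps : List σ) (T : List (List Int)) (r c : Nat) :
    pvGet2 (ps.foldl (fun T p => if g p then pvSet1 T (ρ p) (γ p) else T) T) r c
      = if (∃ p ∈ ps, g p ∧ ρ p = r ∧ γ p = c)
        then (pvGet2 T r c).map (fun _ => (1 : Int)) else pvGet2 T r c := by
  induction ps generalizing T with
  | nil => simp
  | cons p ps ih =>
    simp only [List.foldl_cons]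
    rw [ih]
    by_cases hg : g p
    · by_cases hrc : ρ p = r ∧ γ p = c
      · have hstep : pvGet2 (if g p then pvSet1 T (ρ p) (γ p) else T) r c
            = (pvGet2 T r c).map (fun _ => (1 : Int)) := by
          rw [if_pos hg, pvSet1_get2, if_pos hrc, hrc.1, hrc.2]
        have hhead : ∃ q ∈ p :: ps, g q ∧ ρ q = r ∧ γ q = c := ⟨p, List.mem_cons_self, hg, hrc⟩
        rw [if_pos hhead, hstep]
        split
        · rw [Option.map_map]; rfl
        · rfl
      · have hstep : pvGet2 (if g p then pvSet1 T (ρ p) (γ p) else T) r c = pvGet2 T r c := by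
          rw [if_pos hg, pvSet1_get2, if_neg hrc]
        rw [hstep]
        have hiff : (∃ q ∈ p :: ps, g q ∧ ρ q = r ∧ γ q = c)
            ↔ (∃ q ∈ ps, g q ∧ ρ q = r ∧ γ q = c) := by
          constructor
          · rintro ⟨q, hq, hgq, hq2⟩
            rcases List.mem_cons.mp hq with h | h
            · exact absurd hq2 (h ▸ hrc)
            · exact ⟨q, h, hgq, hq2⟩
          · rintro ⟨q, hq, hgq, hq2⟩; exact ⟨q, List.mem_cons_of_mem _ hq, hgq, hq2⟩
        simp only [hiff]
    · have hstep : (if g p then pvSet1 T (ρ p) (γ p) else T) = T := if_neg hg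
      rw [hstep]
      have hiff : (∃ q ∈ p :: ps, g q ∧ ρ q = r ∧ γ q = c)
          ↔ (∃ q ∈ ps, g q ∧ ρ q = r ∧ γ q = c) := by
        constructor
        · rintro ⟨q, hq, hgq, hq2⟩
          rcases List.mem_cons.mp hq with h | h
          · exact absurd hgq (h ▸ hg)
          · exact ⟨q, h, hgq, hq2⟩
        · rintro ⟨q, hq, hgq, hq2⟩; exact ⟨q, List.mem_cons_of_mem _ hq, hgq, hq2⟩
      simp only [hiff]

theorem pvFold_shape {σ : Type} (g : σ → Prop) [DecidablePred g] (ρ γ : σ → Nat)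
    (ps : List σ) (T : List (List Int)) :
    (ps.foldl (fun T p => if g p then pvSet1 T (ρ p) (γ p) else T) T).map List.length
      = T.map List.length := by
  induction ps generalizing T with
  | nil => rfl
  | cons p ps ih =>
    simp only [List.foldl_cons]
    rw [ih]
    split
    · exact pvSet1_shape _ _ _
    · rfl

theorem pvInit_eq (L : List Int) (n : Nat) (acc : List (List Int)) :
    (List.range n).foldl (fun T _ => T ++ [L]) acc = acc ++ List.replicate n L := by
  induction n generalizing acc with
  | zero => simp
  | succ n ih =>
    rw [List.range_succ, List.foldl_append, ih, List.replicate_succ']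
    simp

theorem pvEq_of_shape_get2 (T₁ T₂ : List (List Int))
    (hs : T₁.map List.length = T₂.map List.length)
    (hg : ∀ r c, pvGet2 T₁ r c = pvGet2 T₂ r c) : T₁ = T₂ := by
  apply List.ext_getElem?
  intro r
  have hlen : T₁[r]?.map List.length = T₂[r]?.map List.length := by
    have := congrArg (fun l => l[r]?) hs
    simpa [List.getElem?_map] using this
  cases h1 : T₁[r]? with
  | none => cases h2 : T₂[r]? with
    | none => rfl
    | some row => rw [h1, h2] at hlen; simp at hlen
  | some row1 => cases h2 : T₂[r]? with
    | none => rw [h1, h2] at hlen; simp at hlen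
    | some row2 =>
      congr 1
      apply List.ext_getElem?
      intro c
      have := hg r c
      simpa [pvGet2, h1, h2] using this

-- ===== VERDICT (by name: the statement is the Claim_ definition above) =====
theorem converte_tabuleiro_main (VT : List Int) :
    converte_tabuleiro VT = converte_tabuleiro_alt VT := by
  have hA : converte_tabuleiro VT =
      (((List.range VT.length).flatMap
          (fun lin => (List.range VT.length).map (fun col => (lin, col)))).foldl
        (fun T (p : Nat × Nat) =>
          if ((p.1 : Int) + 1 = VT.getD p.2 0) then pvSet1 T p.1 p.2 else T)
        (List.replicate VT.length (List.replicate VT.length (0 : Int)))) := by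
    simp only [converte_tabuleiro]
    rw [pvInit_eq, List.nil_append, List.foldl_flatMap]
    simp only [List.foldl_map]
  rw [hA]
  simp only [converte_tabuleiro_alt]
  apply pvEq_of_shape_get2
  · rw [pvFold_shape (fun p : Nat × Nat => ((p.1 : Int) + 1 = VT.getD p.2 0))
        (fun p => p.1) (fun p => p.2)]
    rw [pvFold_shape (fun p : Int × Int => (1 ≤ p.2 ∧ p.2 ≤ (VT.length : Int)))
        (fun p => (p.2 - 1).toNat) (fun p => p.1.toNat)]
  · intro r c
    rw [pvFold_get2 (fun p : Nat × Nat => ((p.1 : Int) + 1 = VT.getD p.2 0))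
        (fun p => p.1) (fun p => p.2)]
    rw [pvFold_get2 (fun p : Int × Int => (1 ≤ p.2 ∧ p.2 ≤ (VT.length : Int)))
        (fun p => (p.2 - 1).toNat) (fun p => p.1.toNat)]
    have hA' : (∃ p ∈ (List.range VT.length).flatMap
          (fun lin => (List.range VT.length).map (fun col => (lin, col))),
          ((p.1 : Int) + 1 = VT.getD p.2 0) ∧ p.1 = r ∧ p.2 = c)
        ↔ (r < VT.length ∧ c < VT.length ∧ (r : Int) + 1 = VT.getD c 0) := by
      constructor
      · rintro ⟨p, hp, hg, h1, h2⟩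
        rcases List.mem_flatMap.mp hp with ⟨lin, hlin, hpm⟩
        rcases List.mem_map.mp hpm with ⟨col, hcol, hpc⟩
        subst hpc
        simp only at h1 h2
        subst h1; subst h2
        exact ⟨List.mem_range.mp hlin, List.mem_range.mp hcol, hg⟩
      · rintro ⟨hr, hc, hg⟩
        exact ⟨(r, c), List.mem_flatMap.mpr ⟨r, List.mem_range.mpr hr,
          List.mem_map.mpr ⟨c, List.mem_range.mpr hc, rfl⟩⟩, hg, rfl, rfl⟩
    have hB' : (∃ p ∈ PySem.List.enumerate VT,
          (1 ≤ p.2 ∧ p.2 ≤ (VT.length : Int)) ∧ (p.2 - 1).toNat = r ∧ p.1.toNat = c)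
        ↔ (c < VT.length ∧ 1 ≤ VT.getD c 0 ∧ VT.getD c 0 ≤ (VT.length : Int) ∧
            (VT.getD c 0 - 1).toNat = r) := by
      constructor
      · rintro ⟨p, hp, ⟨hg1, hg2⟩, h1, h2⟩
        rcases (PySem.List.mem_enumerate_iff VT 0 p).mp hp with ⟨k, hk, hpk⟩
        subst hpk
        simp only [Int.zero_add] at h1 h2 hg1 hg2
        have hkc : k = c := by omega
        subst hkc
        rw [List.getD_eq_getElem VT 0 hk]
        exact ⟨hk, hg1, hg2, h1⟩
      · rintro ⟨hc, hg1, hg2, h1⟩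
        refine ⟨((c : Int), VT[c]'hc), (PySem.List.mem_enumerate_iff VT 0 _).mpr
          ⟨c, hc, by simp⟩, ?_, ?_, by simp⟩
        · rw [List.getD_eq_getElem VT 0 hc] at hg1 hg2; exact ⟨hg1, hg2⟩
        · rw [List.getD_eq_getElem VT 0 hc] at h1; exact h1
    simp only [hA', hB']
    have hiff : (r < VT.length ∧ c < VT.length ∧ (r : Int) + 1 = VT.getD c 0)
        ↔ (c < VT.length ∧ 1 ≤ VT.getD c 0 ∧ VT.getD c 0 ≤ (VT.length : Int) ∧
            (VT.getD c 0 - 1).toNat = r) := by omega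
    simp only [hiff]

theorem converte_tabuleiro_spec : Claim_equal_converte_tabuleiro := by
  intro VT _
  unfold Spec_converte_tabuleiro
  exact converte_tabuleiro_main VT
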